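-- pv_equiv track=rewrite | github.com/Roj/tp-modelos | borradores/maximales.py | prune_conjs
-- ===== SOURCE A (Python) =====
-- def cont_en(conj1,conj2):
--     """True sii conj1 contenido en conj2"""
--     for e in conj1:
--         if e not in conj2:
--             return False
--     return True
--
-- def prune_conjs(conjs):
--     l = len(conjs)
--     for idx in range(l):
--         for idx2 in range(l):
--             if conjs[idx] is None or idx==idx2 or conjs[idx2] is None:
--                 continue
--             if cont_en(conjs[idx],conjs[idx2]): #si el primero esta en el segundo lo borro, luego no lo pruebo mas
--                 conjs[idx] = None
--                 break
--     return [c for c in conjs if c is not None]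
-- ===== SOURCE B (Python) =====
-- def _subset(c1, c2):
--     return all(e in c2 for e in c1)
--
-- def prune_conjs(conjs):
--     # One pass with a survivors accumulator; equivalence is about the return
--     # value only (A marks pruned slots of the input list with None in place,
--     # B does not mutate its argument).
--     survivors = []
--     for i, c in enumerate(conjs):
--         if any(_subset(c, s) for s in survivors) or \
--            any(_subset(c, d) for d in conjs[i + 1:]):
--             continue
--         survivors.append(c)
--     return survivors
-- ===== Notes on version B (the rewrite author's own statement) =====
-- stated objective: simpler
-- what changed: Replaces the in-place None-marking double loop over all index pairs with a single non-mutating sweep that keeps a survivors accumulator and tests each set only against earlier survivors and the remaining tail.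
import Mathlib
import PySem

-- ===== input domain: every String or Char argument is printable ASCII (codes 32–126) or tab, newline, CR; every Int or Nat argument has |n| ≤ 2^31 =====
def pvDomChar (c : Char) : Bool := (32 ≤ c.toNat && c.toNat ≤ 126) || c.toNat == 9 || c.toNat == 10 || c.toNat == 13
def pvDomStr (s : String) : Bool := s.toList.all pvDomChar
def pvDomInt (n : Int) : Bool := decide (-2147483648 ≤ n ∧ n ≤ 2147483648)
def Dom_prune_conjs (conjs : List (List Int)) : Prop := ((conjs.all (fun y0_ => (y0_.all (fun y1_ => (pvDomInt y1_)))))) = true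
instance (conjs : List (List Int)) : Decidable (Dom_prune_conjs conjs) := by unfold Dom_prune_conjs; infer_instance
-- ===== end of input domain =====

-- B replaces A's in-place None-marking double loop (quadratic over all index
-- pairs with None guards) by a single sweep keeping a survivors accumulator,
-- comparing each set only against earlier survivors and the remaining tail;
-- objective: simpler (no mutation, no sentinel bookkeeping).  The equivalence
-- is about the RETURN value only: A overwrites pruned slots of its argument
-- with None in place, B leaves the argument untouched.

-- ===== PORT A =====
-- cont_en: early-return membership loop = List.all
def contEn (conj1 conj2 : List Int) : Bool := conj1.all (fun e => decide (e ∈ conj2))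

-- inner 'for idx2 in range(l)' loop: its only effect is possibly setting slot idx
-- to none (then break), so it reduces to: does some idx2 pass all the guards?
def killCond (s : List (Option (List Int))) (idx : Nat) : Bool :=
  (List.range s.length).any (fun idx2 =>
    match s[idx]? with
    | some (some c) =>
        decide (idx ≠ idx2) &&
        (match s[idx2]? with
         | some (some d) => contEn c d
         | _ => false)
    | _ => false)

-- outer 'for idx in range(l)' loop over the mutable list of Option slots
def outerA (s : List (Option (List Int))) : List Nat → List (Option (List Int))
  | [] => s
  | idx :: idxs => outerA (if killCond s idx then s.set idx none else s) idxs

def prune_conjs (conjs : List (List Int)) : List (List Int) :=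
  (outerA (conjs.map some) (List.range conjs.length)).filterMap id

-- ===== PORT B =====
def subsetB (c1 c2 : List Int) : Bool := c1.all (fun e => decide (e ∈ c2))

-- B's sweep: keep c only if it is a subset of no earlier survivor and of no later set
def survLoop (survivors : List (List Int)) : List (List Int) → List (List Int)
  | [] => survivors
  | c :: rest =>
      if survivors.any (fun s => subsetB c s) || rest.any (fun d => subsetB c d) then
        survLoop survivors rest
      else
        survLoop (survivors ++ [c]) rest

def prune_conjs_alt (conjs : List (List Int)) : List (List Int) :=
  survLoop [] conjs

-- ===== PRECONDITION & SPEC =====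
def Spec_prune_conjs (conjs : List (List Int)) (out : List (List Int)) : Prop := out = prune_conjs_alt conjs
instance (conjs : List (List Int)) (out : List (List Int)) : Decidable (Spec_prune_conjs conjs out) := by unfold Spec_prune_conjs; infer_instance

-- ===== CLAIM (what is proved, stated in full; the proofs are below) =====
def Claim_equal_prune_conjs : Prop := ∀ (conjs : List (List Int)), Dom_prune_conjs conjs → Spec_prune_conjs conjs (prune_conjs conjs)

-- ===== LEMMAS AND PROOFS =====

lemma any_congr_mem {α : Type} (l : List α) (p q : α → Bool)
    (h : ∀ a ∈ l, p a = q a) : l.any p = l.any q := by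
  induction l with
  | nil => rfl
  | cons a l ih =>
    simp only [List.any_cons, h a (by simp), ih (fun b hb => h b (by simp [hb]))]

-- test against a slot of the option list
def gOpt (c : List Int) : Option (Option (List Int)) → Bool
  | some (some d) => contEn c d
  | _ => false

lemma front_any (c : List Int) (tail : List (Option (List Int))) :
    ∀ front : List (Option (List Int)),
    (List.range front.length).any (fun i => gOpt c (front ++ tail)[i]?)
      = (front.filterMap id).any (fun d => contEn c d) := by
  intro front
  induction front with
  | nil => rfl
  | cons o front ih =>
    rw [List.length_cons, List.range_succ_eq_map, List.any_cons, List.any_map]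
    have hshift : ((fun i => gOpt c ((o :: front) ++ tail)[i]?) ∘ Nat.succ)
        = (fun i => gOpt c (front ++ tail)[i]?) := by
      funext i; simp [Function.comp]
    rw [hshift, ih]
    cases o with
    | none => simp [gOpt]
    | some d => simp [gOpt]

lemma tail_any (c : List Int) (rs : List (List Int)) :
    (List.range rs.length).any
        (fun j => match rs[j]? with | some d => contEn c d | none => false)
      = rs.any (fun d => contEn c d) := by
  induction rs with
  | nil => rfl
  | cons d rs ih =>
    rw [List.length_cons, List.range_succ_eq_map, List.any_cons, List.any_map]
    have hshift : ((fun j => match (d :: rs)[j]? with | some e => contEn c e | none => false) ∘ Nat.succ)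
        = (fun j => match rs[j]? with | some e => contEn c e | none => false) := by
      funext j; simp [Function.comp]
    rw [hshift, ih]
    simp

lemma kill_eq (front : List (Option (List Int))) (c : List Int) (rs : List (List Int)) :
    killCond (front ++ some c :: rs.map some) front.length
      = ((front.filterMap id).any (fun d => contEn c d) || rs.any (fun d => contEn c d)) := by
  set s := front ++ some c :: rs.map some with hs
  have hidx : s[front.length]? = some (some c) := by
    simp [hs]
  have hlen : s.length = front.length + (1 + rs.length) := by
    simp [hs]; omega
  have hpred : (fun idx2 =>
      match s[front.length]? with
      | some (some c') =>
          decide (front.length ≠ idx2) &&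
          (match s[idx2]? with
           | some (some d) => contEn c' d
           | _ => false)
      | _ => false)
      = (fun idx2 => decide (front.length ≠ idx2) && gOpt c s[idx2]?) := by
    funext idx2
    rw [hidx]
    rcases h : s[idx2]? with _ | (_ | d) <;> simp [gOpt]
  unfold killCond
  rw [hpred, hlen, List.range_add, List.any_append, List.any_map]
  congr 1
  · rw [← front_any c (some c :: rs.map some) front]
    apply any_congr_mem
    intro i hi
    have hi' : i < front.length := List.mem_range.mp hi
    have hne : front.length ≠ i := by omega
    rcases h : s[i]? with _ | (_ | d) <;> simp [gOpt, hne]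
  · rw [Nat.add_comm 1 rs.length, List.range_succ_eq_map, List.any_cons, List.any_map]
    simp only [Function.comp]
    have h0 : (decide (front.length ≠ front.length + 0) && gOpt c s[front.length + 0]?) = false := by
      simp
    rw [h0, Bool.false_or, ← tail_any c rs]
    apply any_congr_mem
    intro j hj
    have hj' : j < rs.length := List.mem_range.mp hj
    have hne : front.length ≠ front.length + Nat.succ j := by omega
    have hget : s[front.length + Nat.succ j]? = (rs[j]?).map some := by
      rw [hs]
      rw [List.getElem?_append_right (by omega)]
      have : front.length + Nat.succ j - front.length = j + 1 := by omega
      rw [this, List.getElem?_cons_succ, List.getElem?_map]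
    rcases h : rs[j]? with _ | d <;> simp [gOpt, h, hget]

lemma set_append_len {α : Type} (front : List α) (x y : α) (t : List α) :
    (front ++ x :: t).set front.length y = front ++ y :: t := by
  induction front with
  | nil => rfl
  | cons a front ih => simp [ih]

lemma outer_main (rs : List (List Int)) :
    ∀ front : List (Option (List Int)),
    (outerA (front ++ rs.map some) (List.range' front.length rs.length)).filterMap id
      = survLoop (front.filterMap id) rs := by
  induction rs with
  | nil => intro front; simp [outerA, survLoop]
  | cons c rs ih =>
    intro front
    rw [List.length_cons, List.range'_succ, List.map_cons]
    show (outerA _ (front.length :: _)).filterMap id = _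
    rw [outerA, kill_eq]
    have hsub : (fun d => subsetB c d) = (fun d => contEn c d) := rfl
    by_cases h : ((front.filterMap id).any (fun d => contEn c d)
        || rs.any (fun d => contEn c d)) = true
    · rw [if_pos h, set_append_len]
      have he : front ++ none :: rs.map some = (front ++ [none]) ++ rs.map some := by simp
      have hlen : front.length + 1 = (front ++ [none]).length := by simp
      rw [he, hlen, ih (front ++ [none])]
      simp only [survLoop, hsub]
      rw [if_pos h]
      simp
    · rw [if_neg h]
      have he : front ++ some c :: rs.map some = (front ++ [some c]) ++ rs.map some := by simp
      have hlen : front.length + 1 = (front ++ [some c]).length := by simp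
      rw [he, hlen, ih (front ++ [some c])]
      simp only [survLoop, hsub]
      rw [if_neg h]
      simp

-- ===== VERDICT (by name: the statement is the Claim_ definition above) =====
theorem prune_conjs_spec : Claim_equal_prune_conjs := by
  intro conjs _
  unfold Spec_prune_conjs prune_conjs prune_conjs_alt
  have := outer_main conjs []
  simpa [List.range_eq_range'] using this
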